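-- pv_equiv track=rewrite | github.com/peterjc/ccn | graphs.py | make_partition
-- ===== SOURCE A (Python) =====
-- def make_partition(classifiers):
--     """Make a partition from list/tuple/sequence of hashable elements.
--
--     Constructs a partition using our representation as a list of integers,
--     for example:
--
--     >>> make_partition("apple")
--     [0, 1, 1, 2, 3]
--     >>> make_partition(["A", "B", "B", "A"])
--     [0, 1, 1, 0]
--
--     This can also be used to 'normalise' a integer classification:
--
--     >>> make_partition([3, 2, 2, 1])
--     [0, 1, 1, 2]
--
--     Note a list of lists is not suitable, convert this into a list of tuples
--     or another hashable datatype first.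
--     """
--     partition = []
--     mapping = {}
--     for x in classifiers:
--         if x in mapping:
--             partition.append(mapping[x])
--         elif mapping:
--             partition.append(max(partition) + 1)
--             mapping[x] = partition[-1]
--         else:
--             # First element
--             assert not partition
--             partition = [0]
--             mapping[x] = 0
--     return partition
-- ===== SOURCE B (Python) =====
-- def make_partition(classifiers):
--     mapping = {}
--     for x in classifiers:
--         if x not in mapping:
--             mapping[x] = len(mapping)
--     return [mapping[x] for x in classifiers]
-- ===== Notes on version B (the rewrite author's own statement) =====
-- stated objective: faster
-- what changed: A interleaves output-building with dict insertion and rescans the whole output with max(partition)+1 for every new label; B builds the label table alone in one pass using len(mapping) as the next label and then maps the input through the finished table in a second pass.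
import Mathlib
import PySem

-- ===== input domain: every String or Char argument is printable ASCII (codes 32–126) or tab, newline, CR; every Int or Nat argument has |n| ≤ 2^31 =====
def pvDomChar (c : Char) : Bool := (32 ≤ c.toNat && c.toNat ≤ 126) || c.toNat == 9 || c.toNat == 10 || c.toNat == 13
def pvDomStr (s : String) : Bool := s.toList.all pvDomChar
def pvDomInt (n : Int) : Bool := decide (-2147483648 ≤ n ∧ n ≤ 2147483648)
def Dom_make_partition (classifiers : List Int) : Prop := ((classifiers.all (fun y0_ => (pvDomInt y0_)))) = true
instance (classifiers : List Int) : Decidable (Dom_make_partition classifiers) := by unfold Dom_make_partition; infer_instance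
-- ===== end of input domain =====

-- B builds the label table alone (next label = len(mapping)) then maps the input through it in a
-- second pass, instead of A's interleaved loop that rescans the output with max(partition)+1.


-- ===== PORT A =====
-- one loop step of A: the (partition, mapping) state; `elif mapping:` is the nonemptiness test,
-- `max(partition)` is PySem.List.max? (partition is provably nonempty in that branch, so the
-- `.getD 0` default is never used)
def mpStepA (st : List Int × PySem.Dict Int Int) (x : Int) : List Int × PySem.Dict Int Int :=
  match st.2.get? x with
  | some v => (st.1 ++ [v], st.2)
  | none =>
    if st.2.size ≠ 0 then
      let v := (PySem.List.max? st.1 (fun y => y)).getD 0 + 1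
      (st.1 ++ [v], st.2.insert x v)
    else
      ([0], st.2.insert x 0)

def make_partition (classifiers : List Int) : List Int :=
  (classifiers.foldl mpStepA ([], PySem.Dict.empty)).1

-- ===== PORT B =====
-- one loop step of B's table-building pass: mapping[x] = len(mapping) on first sight of x
def mpStepB (m : PySem.Dict Int Int) (x : Int) : PySem.Dict Int Int :=
  if m.contains x then m else m.insert x (m.size : Int)

def make_partition_alt (classifiers : List Int) : List Int :=
  let mapping := classifiers.foldl mpStepB PySem.Dict.empty
  classifiers.map (fun x => mapping.getD x 0)

-- ===== PRECONDITION & SPEC =====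
def Spec_make_partition (classifiers : List Int) (out : List Int) : Prop := out = make_partition_alt classifiers
instance (classifiers : List Int) (out : List Int) : Decidable (Spec_make_partition classifiers out) := by unfold Spec_make_partition; infer_instance

-- ===== CLAIM (what is proved, stated in full; the proofs are below) =====
def Claim_equal_make_partition : Prop := ∀ (classifiers : List Int), Dom_make_partition classifiers → Spec_make_partition classifiers (make_partition classifiers)

-- ===== LEMMAS AND PROOFS =====

-- an empty dict (size 0) has no bindings
lemma get?_of_size_zero (d : PySem.Dict Int Int) (h : d.size = 0) (k : Int) :
    d.get? k = none := by
  have hi : d.items = [] := List.length_eq_zero_iff.mp h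
  have hd : d = PySem.Dict.empty := PySem.Dict.ext (by simp [hi, PySem.Dict.empty])
  rw [hd, PySem.Dict.get?_empty]

-- B's table pass never changes an existing binding
lemma buildB_preserves (l : List Int) (m : PySem.Dict Int Int) (k v : Int)
    (h : m.get? k = some v) : (l.foldl mpStepB m).get? k = some v := by
  induction l generalizing m with
  | nil => exact h
  | cons x l ih =>
    simp only [List.foldl_cons]
    apply ih
    unfold mpStepB
    split_ifs with hc
    · exact h
    · have hkx : k ≠ x := by
        intro he; subst he
        rw [PySem.Dict.contains_eq_isSome_get?, h] at hc
        simp at hc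
      rw [PySem.Dict.get?_insert_of_ne _ _ hkx, h]

-- main loop invariant: from a reachable state (p, m), A's remaining fold appends exactly
-- B's lookups of the finished table
lemma mp_main (l : List Int) (p : List Int) (m : PySem.Dict Int Int)
    (h1 : m.size = 0 → p = [])
    (h2 : m.size ≠ 0 → p ≠ [])
    (h3 : ∀ y ∈ p, y < (m.size : Int))
    (h4 : m.size ≠ 0 → ((m.size : Int) - 1) ∈ p)
    (h5 : ∀ k v, m.get? k = some v → v < (m.size : Int)) :
    (l.foldl mpStepA (p, m)).1 = p ++ l.map (fun x => (l.foldl mpStepB m).getD x 0) := by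
  induction l generalizing p m with
  | nil => simp
  | cons x l ih =>
    simp only [List.foldl_cons, List.map_cons]
    rcases hg : m.get? x with _ | v
    · -- x not yet in the mapping
      have hc : m.contains x = false := by
        rw [PySem.Dict.contains_eq_isSome_get?, hg]; rfl
      have hstB : mpStepB m x = m.insert x (m.size : Int) := by
        simp [mpStepB, hc]
      have hsz' : (m.insert x (m.size : Int)).size = m.size + 1 := by
        rw [PySem.Dict.size_insert, hc]; simp
      have h5' : ∀ k v, (m.insert x (m.size : Int)).get? k = some v →
          v < (((m.insert x (m.size : Int)).size : Nat) : Int) := by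
        intro k v hkv
        rw [PySem.Dict.get?_insert] at hkv
        rw [hsz']
        split_ifs at hkv with hk
        · cases hkv; push_cast; omega
        · have := h5 k v hkv; push_cast; omega
      have hpres : (l.foldl mpStepB (m.insert x (m.size : Int))).getD x 0 = (m.size : Int) := by
        rw [PySem.Dict.getD_eq_get?_getD,
            buildB_preserves l _ x _ (PySem.Dict.get?_insert_self m x _)]; rfl
      by_cases hsz : m.size = 0
      · -- first element: partition = [0], mapping[x] = 0
        have hp : p = [] := h1 hsz
        have hstA : mpStepA (p, m) x = ([0], m.insert x 0) := by
          simp [mpStepA, hg, hsz]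
        have hz : ((m.size : Nat) : Int) = 0 := by exact_mod_cast hsz
        rw [hstA, hstB, hz]
        have hrec := ih [0] (m.insert x 0)
          (by rw [PySem.Dict.size_insert, hc]; simp)
          (by intro _; simp)
          (by intro y hy; simp at hy; subst hy
              rw [PySem.Dict.size_insert, hc]; push_cast; omega)
          (by intro _
              rw [PySem.Dict.size_insert, hc]
              simp [hsz])
          (by have := h5'; rw [hz] at this; exact this)
        rw [hrec, hp]
        have := hpres; rw [hz] at this
        simp [this]
      · -- new label: max(partition) + 1 = len(mapping)
        have hp : p ≠ [] := h2 hsz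
        obtain ⟨mx, hmx⟩ : ∃ mx, PySem.List.max? p (fun y => y) = some mx := by
          rcases h : PySem.List.max? p (fun y => y) with _ | mx
          · exact absurd ((PySem.List.max?_eq_none_iff p _).mp h) hp
          · exact ⟨mx, rfl⟩
        have hmxv : mx = (m.size : Int) - 1 := by
          have hub := h3 mx (PySem.List.max?_mem hmx)
          have hlb := PySem.List.max?_isMax hmx _ (h4 hsz)
          simp at hlb
          omega
        have hone : mx + 1 = (m.size : Int) := by omega
        have hstA : mpStepA (p, m) x = (p ++ [(m.size : Int)], m.insert x (m.size : Int)) := by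
          simp [mpStepA, hg, hsz, hmx, hone]
        rw [hstA, hstB]
        have hrec := ih (p ++ [(m.size : Int)]) (m.insert x (m.size : Int))
          (by rw [hsz']; omega)
          (by intro _; simp)
          (by intro y hy; rw [hsz']
              rcases List.mem_append.mp hy with h | h
              · have := h3 y h; push_cast; omega
              · simp at h; subst h; push_cast; omega)
          (by intro _
              rw [hsz']
              apply List.mem_append_right
              simp)
          h5'
        rw [hrec, List.append_assoc]
        simp [hpres]
    · -- x already in the mapping
      have hc : m.contains x = true := by
        rw [PySem.Dict.contains_eq_isSome_get?, hg]; rfl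
      have hstA : mpStepA (p, m) x = (p ++ [v], m) := by
        simp [mpStepA, hg]
      have hstB : mpStepB m x = m := by simp [mpStepB, hc]
      rw [hstA, hstB]
      have hsz : m.size ≠ 0 := by
        intro h0
        rw [get?_of_size_zero m h0 x] at hg
        cases hg
      have hrec := ih (p ++ [v]) m
        (by intro h0; exact absurd h0 hsz)
        (by intro _; simp)
        (by intro y hy; rcases List.mem_append.mp hy with h | h
            · exact h3 y h
            · simp at h; subst h; exact h5 x y hg)
        (by intro h0; exact List.mem_append_left _ (h4 h0))
        h5
      rw [hrec, List.append_assoc]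
      have hv : (l.foldl mpStepB m).getD x 0 = v := by
        rw [PySem.Dict.getD_eq_get?_getD, buildB_preserves l m x v hg]; rfl
      simp [hv]

-- ===== VERDICT (by name: the statement is the Claim_ definition above) =====
theorem make_partition_spec : Claim_equal_make_partition := by
  intro cs _
  unfold Spec_make_partition make_partition make_partition_alt
  have := mp_main cs [] PySem.Dict.empty
    (by intro _; rfl)
    (by intro h; simp [PySem.Dict.size_empty] at h)
    (by intro y hy; simp at hy)
    (by intro h; simp [PySem.Dict.size_empty] at h)
    (by intro k v h; simp [PySem.Dict.get?_empty] at h)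
  simpa using this
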